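-- pv_equiv track=rewrite | github.com/jaysonndungu/Uber-Career-Prep | 2UniqueSum.py | uniqueSum
-- ===== SOURCE A (Python) =====
-- def uniqueSum(myList):
--     uniqueDict={}
--     sum=0 #initializing sum to 0
--     for i in myList:
--         if i not in uniqueDict: #if the number has not been seen
--             uniqueDict[i]=1 #Adds a count to verify the number has been seen
--             sum+=i #adds the unique number to the initialized sum
--     return sum
-- ===== SOURCE B (Python) =====
-- def uniqueSum(myList):
--     total = 0
--     prev = None
--     for x in sorted(myList):
--         if prev is None or x != prev:
--             total += x
--         prev = x
--     return total
-- ===== Notes on version B (the rewrite author's own statement) =====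
-- stated objective: alternative
-- what changed: Replaces A's seen-dict single pass by sort-then-scan: sort the list, then sum each element that differs from its predecessor, so duplicates are detected by adjacency after sorting instead of by hashing.
import Mathlib
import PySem

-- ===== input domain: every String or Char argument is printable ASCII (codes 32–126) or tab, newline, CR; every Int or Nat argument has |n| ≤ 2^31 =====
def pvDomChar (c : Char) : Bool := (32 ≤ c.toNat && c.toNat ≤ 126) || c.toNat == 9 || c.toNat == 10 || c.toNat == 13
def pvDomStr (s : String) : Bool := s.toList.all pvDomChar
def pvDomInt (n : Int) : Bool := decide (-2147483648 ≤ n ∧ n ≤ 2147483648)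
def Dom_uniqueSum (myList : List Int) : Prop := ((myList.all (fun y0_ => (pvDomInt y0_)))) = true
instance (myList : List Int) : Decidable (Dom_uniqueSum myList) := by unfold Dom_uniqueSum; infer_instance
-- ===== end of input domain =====

-- B replaces A's seen-dict single pass by sort-then-scan: after sorting, duplicates are adjacent, so B sums each element that differs from its predecessor; alternative algorithm, same result.

-- ===== PORT A =====
-- A: one loop carrying (uniqueDict, sum); add i only when i is not yet a key.
def uniqueSum (myList : List Int) : Int :=
  (myList.foldl
    (fun (st : PySem.Dict Int Int × Int) i =>
      if st.1.contains i then st else (st.1.insert i 1, st.2 + i))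
    (PySem.Dict.empty, 0)).2

-- ===== PORT B =====
-- B loop body: if prev is None or x != prev: total += x; prev = x   (state = (total, prev))
def uniqueSumAltStep (st : Int × Option Int) (x : Int) : Int × Option Int :=
  (match st.2 with
   | none => st.1 + x
   | some q => if x ≠ q then st.1 + x else st.1, some x)

-- B: total = 0; prev = None; for x in sorted(myList): …; return total
def uniqueSum_alt (myList : List Int) : Int :=
  ((PySem.List.sorted myList (fun x => x) false).foldl uniqueSumAltStep
    (0, (none : Option Int))).1

-- ===== PRECONDITION & SPEC =====
def Spec_uniqueSum (myList : List Int) (out : Int) : Prop := out = uniqueSum_alt myList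
instance (myList : List Int) (out : Int) : Decidable (Spec_uniqueSum myList out) := by unfold Spec_uniqueSum; infer_instance

-- ===== CLAIM (what is proved, stated in full; the proofs are below) =====
def Claim_equal_uniqueSum : Prop := ∀ (myList : List Int), Dom_uniqueSum myList → Spec_uniqueSum myList (uniqueSum myList)

-- ===== LEMMAS AND PROOFS =====

-- A's loop invariant: the running sum grows by the sum of the NEW elements
-- (the elements of l not already keys of the dict).
theorem uniqueSum_loop (l : List Int) (d : PySem.Dict Int Int) (s : Int) :
    (l.foldl
      (fun (st : PySem.Dict Int Int × Int) i =>
        if st.1.contains i then st else (st.1.insert i 1, st.2 + i))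
      (d, s)).2
    = s + ((PySem.Set.ofList l).filter (fun y => !(PySem.Set.contains d.keys y))).sum := by
  induction l generalizing d s with
  | nil => simp [PySem.Set.ofList]
  | cons x t ih =>
    simp only [List.foldl_cons]
    rw [PySem.Set.ofList_cons]
    by_cases hx : d.contains x = true
    · have hmem : x ∈ d.keys := (PySem.Dict.contains_iff_mem_keys d x).mp hx
      have hfil : List.filter (fun y => !PySem.Set.contains d.keys y) ((PySem.Set.ofList t).discard x)
          = List.filter (fun y => !PySem.Set.contains d.keys y) (PySem.Set.ofList t) := by
        simp only [PySem.Set.discard, List.filter_filter]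
        apply List.filter_congr
        intro y _
        by_cases hxy : y = x
        · subst hxy
          simp [PySem.Set.contains_eq_listContains, List.contains_eq_mem, hmem]
        · simp [hxy]
      rw [if_pos hx, ih]
      congr 1
      rw [List.filter_cons, if_neg (by simp [hmem]), hfil]
    · have hx' : d.contains x = false := by simpa using hx
      have hmem : x ∉ d.keys := fun h => by
        simp [(PySem.Dict.contains_iff_mem_keys d x).mpr h] at hx'
      have key : List.filter (fun y => !PySem.Set.contains (d.keys ++ [x]) y) (PySem.Set.ofList t)
          = List.filter (fun y => !PySem.Set.contains d.keys y) ((PySem.Set.ofList t).discard x) := by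
        simp only [PySem.Set.discard, List.filter_filter]
        apply List.filter_congr
        intro y _
        by_cases hxy : y = x
        · subst hxy
          simp [PySem.Set.contains_eq_listContains, List.contains_eq_mem]
        · simp [PySem.Set.contains_eq_listContains, List.contains_eq_mem, hxy]
      rw [if_neg hx, ih]
      rw [PySem.Dict.keys_insert_of_not_contains d 1 hx']
      rw [List.filter_cons, if_pos (by simp [hmem]), List.sum_cons, key]
      ring

-- B's step on a state with a previous element, as an equation.
theorem uniqueSumAltStep_some (a p x : Int) :
    uniqueSumAltStep (a, some p) x = (if x ≠ p then a + x else a, some x) := rfl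

-- B's scan invariant on a sorted tail: with predecessor p (a lower bound of l),
-- the scan adds exactly the distinct elements of l other than p.
theorem uniqueSumAlt_scan (l : List Int) (p acc : Int)
    (hs : l.Pairwise (· ≤ ·)) (hp : ∀ x ∈ l, p ≤ x) :
    (l.foldl uniqueSumAltStep (acc, some p)).1
    = acc + ((PySem.Set.ofList l).filter (fun y => y ≠ p)).sum := by
  induction l generalizing p acc with
  | nil => simp [PySem.Set.ofList]
  | cons x t ih =>
    have hxt : ∀ y ∈ t, x ≤ y := by
      intro y hy; exact (List.pairwise_cons.mp hs).1 y hy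
    have hst : t.Pairwise (· ≤ ·) := (List.pairwise_cons.mp hs).2
    have hpx : p ≤ x := hp x List.mem_cons_self
    rw [List.foldl_cons, uniqueSumAltStep_some, PySem.Set.ofList_cons]
    by_cases hxp : x = p
    · subst hxp
      rw [if_neg (by simp)]
      rw [ih x acc hst hxt]
      congr 1
      rw [List.filter_cons, if_neg (by simp)]
      simp only [PySem.Set.discard, List.filter_filter]
      congr 1
      symm
      apply List.filter_congr
      intro y _
      by_cases h : y = x <;> simp [h]
    · have hpltx : p < x := lt_of_le_of_ne hpx (fun h => hxp h.symm)
      rw [if_pos hxp]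
      rw [ih x (acc + x) hst hxt]
      rw [List.filter_cons, if_pos (by simp [hxp]), List.sum_cons]
      simp only [PySem.Set.discard, List.filter_filter]
      have heq : List.filter (fun a => decide (a ≠ p) && !a == x) (PySem.Set.ofList t)
          = List.filter (fun y => decide (y ≠ x)) (PySem.Set.ofList t) := by
        apply List.filter_congr
        intro y hy
        have hyt : y ∈ t := (PySem.Set.mem_ofList t y).mp hy
        have hxy : x ≤ y := hxt y hyt
        have hyp : y ≠ p := by omega
        by_cases h : y = x <;> simp [h, hyp]
      rw [heq]
      ring

-- B computes the sum of the distinct elements of the input.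
theorem uniqueSumAlt_eq_sum (myList : List Int) :
    uniqueSum_alt myList = (PySem.Set.ofList myList).sum := by
  have hperm : (PySem.Set.ofList (PySem.List.sorted myList (fun x => x) false)).Perm
      (PySem.Set.ofList myList) := by
    rw [List.perm_ext_iff_of_nodup (PySem.Set.nodup_ofList _) (PySem.Set.nodup_ofList _)]
    intro a
    rw [PySem.Set.mem_ofList, PySem.Set.mem_ofList, PySem.List.mem_sorted]
  rw [← hperm.sum_eq]
  unfold uniqueSum_alt
  cases h : PySem.List.sorted myList (fun x => x) false with
  | nil => simp [PySem.Set.ofList]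
  | cons x t =>
    have hpw : (x :: t).Pairwise (· ≤ ·) := by
      have := PySem.List.sorted_pairwise myList (fun x => x)
      rw [h] at this
      exact this
    rw [List.foldl_cons, show uniqueSumAltStep (0, none) x = (0 + x, some x) from rfl]
    rw [uniqueSumAlt_scan t x (0 + x) (List.pairwise_cons.mp hpw).2
      (fun y hy => (List.pairwise_cons.mp hpw).1 y hy)]
    rw [PySem.Set.ofList_cons, List.sum_cons]
    simp only [PySem.Set.discard]
    have : List.filter (fun y => decide (y ≠ x)) (PySem.Set.ofList t)
        = List.filter (fun a => !a == x) (PySem.Set.ofList t) := by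
      apply List.filter_congr
      intro y _
      by_cases hxy : y = x <;> simp [hxy]
    rw [this]
    ring

-- ===== VERDICT (by name: the statement is the Claim_ definition above) =====
theorem uniqueSum_spec : Claim_equal_uniqueSum := by
  intro myList _
  unfold Spec_uniqueSum uniqueSum
  rw [uniqueSum_loop, uniqueSumAlt_eq_sum]
  rw [show (PySem.Dict.empty : PySem.Dict Int Int).keys = ([] : List Int) from rfl]
  simp [PySem.Set.contains_eq_listContains]
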